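-- pv_equiv track=rewrite | github.com/ijsathi/OOP_and_Python_01 | S_Max_Split.py | Max_Split
-- ===== SOURCE A (Python) =====
-- def Max_Split(s):
--     count = 0
--     balanced_str = []
--     balance = 0
--     current_str = ""
--
--     for char in s:
--         current_str = current_str + char
--         if char == 'L':
--             balance = balance + 1
--         else:
--             balance = balance - 1
--
--         if balance == 0:
--             count = count + 1
--             balanced_str.append(current_str)
--             current_str = ""
--
--     return count, balanced_str
-- ===== SOURCE B (Python) =====
-- def Max_Split(s):
--     # Two-stage: find the indices where the running balance returns to 0,
--     # then slice the original string between consecutive boundaries.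
--     bounds = []
--     bal = 0
--     for i, c in enumerate(s):
--         bal += 1 if c == 'L' else -1
--         if bal == 0:
--             bounds.append(i + 1)
--     parts = [s[p:q] for p, q in zip([0] + bounds, bounds)]
--     return len(parts), parts
-- ===== Notes on version B (the rewrite author's own statement) =====
-- stated objective: alternative
-- what changed: B separates boundary-finding from substring construction: it first collects the indices where the running balance returns to 0, then slices the original string between consecutive boundaries, instead of accumulating the current substring character by character as A does.
import Mathlib
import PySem

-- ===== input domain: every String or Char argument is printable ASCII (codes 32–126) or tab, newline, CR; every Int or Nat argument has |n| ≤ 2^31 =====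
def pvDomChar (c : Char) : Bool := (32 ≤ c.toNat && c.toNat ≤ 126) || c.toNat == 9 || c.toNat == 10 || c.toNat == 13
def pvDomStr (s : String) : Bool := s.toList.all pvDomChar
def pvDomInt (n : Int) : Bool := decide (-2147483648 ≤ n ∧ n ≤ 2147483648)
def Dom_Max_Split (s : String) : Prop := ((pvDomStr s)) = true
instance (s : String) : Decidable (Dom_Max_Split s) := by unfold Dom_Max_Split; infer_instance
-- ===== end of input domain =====

-- B replaces A's character-by-character substring accumulation by a two-stage
-- computation (collect balance-zero boundary indices, then slice the string
-- between consecutive boundaries); objective: alternative decomposition.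

-- ===== PORT A =====
-- state = (count, balanced_str, balance, current_str); current_str kept as
-- List Char, turned into a String exactly when appended (same String values).
def msStep (st : Int × List String × Int × List Char) (c : Char) :
    Int × List String × Int × List Char :=
  let cur' := st.2.2.2 ++ [c]
  let b' := if c = 'L' then st.2.2.1 + 1 else st.2.2.1 - 1
  if b' = 0 then (st.1 + 1, st.2.1 ++ [String.ofList cur'], b', [])
  else (st.1, st.2.1, b', cur')

def Max_Split (s : String) : Int × List String :=
  let st := s.toList.foldl msStep (0, [], 0, [])
  (st.1, st.2.1)

-- ===== PORT B =====
def msBal (c : Char) : Int := if c = 'L' then 1 else -1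

-- the indices (1-based positions after each char) where the running balance is 0
def msBounds : List Char → Int → Nat → List Nat
  | [], _, _ => []
  | c :: cs, b, i =>
    let b' := b + msBal c
    let bs := msBounds cs b' (i + 1)
    if b' = 0 then (i + 1) :: bs else bs

def Max_Split_alt (s : String) : Int × List String :=
  let bounds := msBounds s.toList 0 0
  let parts := (List.zip (0 :: bounds) bounds).map
    (fun pq => PySem.Str.slice s (some (pq.1 : Int)) (some (pq.2 : Int)))
  ((parts.length : Int), parts)

-- ===== PRECONDITION & SPEC =====
def Spec_Max_Split (s : String) (out : Int × List String) : Prop := out = Max_Split_alt s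
instance (s : String) (out : Int × List String) : Decidable (Spec_Max_Split s out) := by unfold Spec_Max_Split; infer_instance

-- ===== CLAIM (what is proved, stated in full; the proofs are below) =====
def Claim_equal_Max_Split : Prop := ∀ (s : String), Dom_Max_Split s → Spec_Max_Split s (Max_Split s)

-- ===== LEMMAS AND PROOFS =====

-- proof helper: the balanced substrings, accumulated directly (A's recursion)
def msParts : List Char → Int → List Char → List String
  | [], _, _ => []
  | c :: cs, b, cur =>
    let b' := b + msBal c
    if b' = 0 then String.ofList (cur ++ [c]) :: msParts cs b' []
    else msParts cs b' (cur ++ [c])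

lemma foldA (cs : List Char) : ∀ (count : Int) (parts : List String) (b : Int) (cur : List Char),
    ∃ b2 cur2, List.foldl msStep (count, parts, b, cur) cs =
      (count + (msParts cs b cur).length, parts ++ msParts cs b cur, b2, cur2) := by
  induction cs with
  | nil => intro count parts b cur; exact ⟨b, cur, by simp [msParts]⟩
  | cons c cs ih =>
    intro count parts b cur
    have hb : (if c = 'L' then b + 1 else b - 1) = b + msBal c := by
      by_cases h : c = 'L'
      · simp [msBal, h]
      · simp [msBal, h]; ring
    by_cases h0 : b + msBal c = 0
    · obtain ⟨b2, cur2, h⟩ := ih (count + 1) (parts ++ [String.ofList (cur ++ [c])]) (b + msBal c) []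
      refine ⟨b2, cur2, ?_⟩
      simp only [List.foldl_cons, msStep, hb, if_pos h0, h, msParts]
      simp only [Prod.mk.injEq, List.length_cons, List.append_assoc, List.cons_append,
        List.nil_append]
      exact ⟨by push_cast; ring, trivial⟩
    · obtain ⟨b2, cur2, h⟩ := ih count parts (b + msBal c) (cur ++ [c])
      refine ⟨b2, cur2, ?_⟩
      simp only [List.foldl_cons, msStep, hb, if_neg h0, h, msParts]

lemma sliceLem (full : List Char) (cs : List Char) :
    ∀ (p : Nat) (b : Int) (cur : List Char), full.drop p = cur ++ cs →
    (List.zip (p :: msBounds cs b (p + cur.length)) (msBounds cs b (p + cur.length))).map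
      (fun pq => String.ofList ((full.drop pq.1).take (pq.2 - pq.1))) = msParts cs b cur := by
  induction cs with
  | nil => intro p b cur _; simp [msBounds, msParts]
  | cons c cs ih =>
    intro p b cur hd
    by_cases h0 : b + msBal c = 0
    · have hd' : full.drop (p + cur.length + 1) = cs := by
        have h1 := congrArg (List.drop (cur.length + 1)) hd
        rw [List.drop_drop] at h1
        have h2 : ((cur ++ [c]) ++ cs).drop (cur.length + 1) = cs := by
          rw [show cur.length + 1 = (cur ++ [c]).length by simp, List.drop_left]
        rw [show p + (cur.length + 1) = p + cur.length + 1 by ring] at h1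
        rw [h1, show cur ++ c :: cs = (cur ++ [c]) ++ cs by simp, h2]
      have hrec := ih (p + cur.length + 1) (b + msBal c) [] (by simpa using hd')
      simp only [msBounds, msParts, if_pos h0]
      simp only [List.zip_cons_cons, List.map_cons]
      refine congrArg₂ (· :: ·) ?_ (by simpa using hrec)
      refine congrArg String.ofList ?_
      rw [hd]
      have h3 : p + cur.length + 1 - p = cur.length + 1 := by omega
      rw [h3, show cur ++ c :: cs = (cur ++ [c]) ++ cs by simp]
      rw [show cur.length + 1 = (cur ++ [c]).length by simp, List.take_left]
    · have hd' : full.drop p = (cur ++ [c]) ++ cs := by simpa using hd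
      have hrec := ih p (b + msBal c) (cur ++ [c]) hd'
      simp only [msBounds, msParts, if_neg h0]
      have hl : p + (cur ++ [c]).length = p + cur.length + 1 := by simp; ring
      rw [hl] at hrec
      exact hrec

lemma slice_eq (s : String) (p q : Nat) :
    PySem.Str.slice s (some (p : Int)) (some (q : Int)) =
      String.ofList ((s.toList.drop p).take (q - p)) := by
  apply String.ext
  rw [PySem.Str.toList_slice]
  simp only [PySem.Chars.slice_eq_listSlice]
  rw [PySem.List.slice_natCast]
  simp

-- ===== VERDICT (by name: the statement is the Claim_ definition above) =====
theorem Max_Split_spec : Claim_equal_Max_Split := by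
  intro s _
  unfold Spec_Max_Split Max_Split Max_Split_alt
  obtain ⟨b2, cur2, h⟩ := foldA s.toList 0 [] 0 []
  have hs := sliceLem s.toList s.toList 0 0 [] (by simp)
  simp only [Nat.add_zero, List.length_nil] at hs
  simp only [h, List.nil_append, Int.zero_add]
  have hmap : (List.zip (0 :: msBounds s.toList 0 0) (msBounds s.toList 0 0)).map
      (fun pq => PySem.Str.slice s (some (pq.1 : Int)) (some (pq.2 : Int))) =
      msParts s.toList 0 [] := by
    rw [← hs]; apply List.map_congr_left; intro pq _; exact slice_eq s pq.1 pq.2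
  rw [hmap]
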